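-- pv_equiv track=rewrite | github.com/OD1995/AdventOfCode2021 | Day12.py | double_small_cave2
-- ===== SOURCE A (Python) =====
-- def double_small_cave2(route):
--     character_count = {}
--     SE = ['start','end']
--     for r in route:
--         if r in character_count:
--             character_count[r] += 1
--         else:
--             character_count[r] = 1
--     small_cave_entry_count = 0
--     for k,v in character_count.items():
--         if (k in SE) & (v > 1):
--             return True
--         elif k.islower() & (k not in SE):
--             if v == 2:
--                 small_cave_entry_count += 1
--             elif v > 2:
--                 return True
--     if small_cave_entry_count > 1:
--         return True
--     else:
--         return False
-- ===== SOURCE B (Python) =====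
-- def double_small_cave2(route):
--     s = sorted(route)
--     n = len(s)
--     doubles = 0
--     i = 0
--     while i < n:
--         j = i
--         while j < n and s[j] == s[i]:
--             j += 1
--         k = s[i]
--         c = j - i
--         if k in ('start', 'end'):
--             if c > 1:
--                 return True
--         elif k.islower():
--             if c > 2:
--                 return True
--             if c == 2:
--                 doubles += 1
--         i = j
--     return doubles > 1
-- ===== Notes on version B (the rewrite author's own statement) =====
-- stated objective: alternative
-- what changed: Replaces the counter-dict build plus a stateful scan over its items by sort-then-run-scan: sort the route, detect each maximal run of equal elements with a two-index scan, and judge the run's length (start/end repeated, small cave tripled, second doubled small cave) as it is found; no dictionary is ever built.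
import Mathlib
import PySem

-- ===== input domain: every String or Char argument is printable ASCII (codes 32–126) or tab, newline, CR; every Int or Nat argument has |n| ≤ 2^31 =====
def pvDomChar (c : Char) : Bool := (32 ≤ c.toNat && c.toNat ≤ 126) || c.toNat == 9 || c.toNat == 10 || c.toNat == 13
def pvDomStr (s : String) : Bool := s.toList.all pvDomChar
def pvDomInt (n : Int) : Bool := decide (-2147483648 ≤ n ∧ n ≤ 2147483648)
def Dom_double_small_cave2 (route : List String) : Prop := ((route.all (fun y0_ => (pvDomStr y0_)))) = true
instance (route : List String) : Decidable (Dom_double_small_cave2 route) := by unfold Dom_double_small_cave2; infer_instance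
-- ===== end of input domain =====

-- B replaces A's counter-dict build plus stateful item scan by a sort-then-run-scan:
-- sort the route, walk maximal runs of equal elements with two indices, and judge each
-- run length as it is found (objective: alternative — no dict, a different traversal).


-- shared helpers: Python's s.islower() (exact on the ASCII domain: some lowercase letter
-- present and no uppercase letter present) and the `k in SE` test
def pyStrIslower (s : String) : Bool :=
  s.toList.any PySem.Chars.islower && !(s.toList.any PySem.Chars.isupper)
def pySE (k : String) : Bool := k == "start" || k == "end"

-- ===== PORT A =====
-- caveLoop is A's second loop: `for k,v in character_count.items(): ...` with its
-- early returns and the running small_cave_entry_count accumulator.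
def caveLoop : List (String × Int) → Int → Bool
  | [], acc => decide (acc > 1)
  | (k, v) :: rest, acc =>
    if pySE k && decide (v > 1) then true
    else if pyStrIslower k && !(pySE k) then
      if v == 2 then caveLoop rest (acc + 1)
      else if decide (v > 2) then true
      else caveLoop rest acc
    else caveLoop rest acc

def double_small_cave2 (route : List String) : Bool :=
  -- first loop: if r in character_count: +=1 else: =1  (insert overwrites in place)
  let cc : PySem.Dict String Int :=
    route.foldl (fun d r => if d.contains r then d.insert r (d.getD r 0 + 1) else d.insert r 1)
      PySem.Dict.empty
  caveLoop cc.items 0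

-- ===== PORT B =====
-- bRuns is Source B's outer while loop: the inner `while j < n and s[j] == s[i]` scan of the
-- run of elements equal to s[i] is the takeWhile/dropWhile split, c = j - i its length.
def bRuns : List String → Int → Bool
  | [], doubles => decide (doubles > 1)
  | k :: rest, doubles =>
    let run := rest.takeWhile (fun x => x == k)
    let rest' := rest.dropWhile (fun x => x == k)
    let c : Int := (run.length : Int) + 1
    if pySE k then
      if decide (c > 1) then true else bRuns rest' doubles
    else if pyStrIslower k then
      if decide (c > 2) then true
      else if c == 2 then bRuns rest' (doubles + 1)
      else bRuns rest' doubles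
    else bRuns rest' doubles
  termination_by l _ => l.length
  decreasing_by all_goals
    simpa [Nat.lt_succ_iff] using List.length_dropWhile_le (fun x => x == k) rest

def double_small_cave2_alt (route : List String) : Bool :=
  bRuns (PySem.List.sorted route (fun x => x) false) 0

-- ===== PRECONDITION & SPEC =====
def Spec_double_small_cave2 (route : List String) (out : Bool) : Prop := out = double_small_cave2_alt route
instance (route : List String) (out : Bool) : Decidable (Spec_double_small_cave2 route out) := by unfold Spec_double_small_cave2; infer_instance

-- ===== CLAIM (what is proved, stated in full; the proofs are below) =====
def Claim_equal_double_small_cave2 : Prop := ∀ (route : List String), Dom_double_small_cave2 route → Spec_double_small_cave2 route (double_small_cave2 route)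

-- ===== LEMMAS AND PROOFS =====

-- proof-only vocabulary: a "small" cave, a bad run (immediate True) and a doubled small cave
def pvSmall (k : String) : Bool := pyStrIslower k && !(pySE k)
def pvBad (k : String) (c : Int) : Bool := (pySE k && decide (c > 1)) || (pvSmall k && decide (c > 2))
def pvDbl (k : String) (c : Int) : Bool := pvSmall k && (c == 2)

-- the common count-based reading both ports are reduced to
def pvSpec (route : List String) (d : Int) : Bool :=
  ((PySem.Set.ofList route).any fun r => pvBad r ((route.count r : Int))) ||
  decide (d + (((PySem.Set.ofList route).countP fun r => pvDbl r ((route.count r : Int))) : Int) > 1)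

lemma aFold_eq_counter (route : List String) :
    route.foldl (fun d r => if d.contains r then d.insert r (d.getD r 0 + 1) else d.insert r 1)
      (PySem.Dict.empty : PySem.Dict String Int) = PySem.Dict.counter route := by
  rw [← PySem.Dict.foldl_insert_getD_add_one_eq_counter]
  generalize (PySem.Dict.empty : PySem.Dict String Int) = d
  induction route generalizing d with
  | nil => rfl
  | cons x xs ih =>
      simp only [List.foldl_cons]
      rw [ih]
      congr 1
      split_ifs with h
      · rfl
      · rw [PySem.Dict.getD_of_not_contains d 0 (by simpa using h)]
        norm_num

lemma caveLoop_eq (items : List (String × Int)) (acc : Int) :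
    caveLoop items acc =
      ((items.any fun kv => pvBad kv.1 kv.2)
        || decide (acc + ((items.countP fun kv => pvDbl kv.1 kv.2) : Int) > 1)) := by
  induction items generalizing acc with
  | nil => simp [caveLoop]
  | cons kv rest ih =>
      obtain ⟨k, v⟩ := kv
      simp only [caveLoop, List.any_cons, List.countP_cons]
      by_cases h1 : (pySE k && decide (v > 1)) = true
      · have hb : pvBad k v = true := by simp [pvBad, h1]
        simp [h1, hb]
      · simp only [Bool.not_eq_true] at h1
        by_cases h2 : (pyStrIslower k && !(pySE k)) = true
        · by_cases h3 : (v == 2) = true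
          · have hv3 : ¬ (v > 2) := by have := beq_iff_eq.mp h3; omega
            have hb : pvBad k v = false := by simp [pvBad, pvSmall, h1, h2, hv3]
            have hd : pvDbl k v = true := by simp [pvDbl, pvSmall, h2, h3]
            simp only [h1, h2, h3, ih, hb, hd, Bool.false_or, Bool.false_eq_true, if_false,
              if_true]
            congr 1
            refine decide_eq_decide.mpr ?_
            push_cast
            omega
          · by_cases h4 : (v > 2)
            · have hb : pvBad k v = true := by simp [pvBad, pvSmall, h2, h4]
              simp [h1, h2, h3, h4, hb]
            · have hb : pvBad k v = false := by simp [pvBad, pvSmall, h1, h2, h4]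
              have hd : pvDbl k v = false := by simp [pvDbl, pvSmall, h2]; simpa using h3
              simp [h1, h2, h3, h4, hb, hd, ih]
        · have hb : pvBad k v = false := by
            simp only [Bool.not_eq_true] at h2
            simp [pvBad, pvSmall, h1, h2]
          have hd : pvDbl k v = false := by
            simp only [Bool.not_eq_true] at h2
            simp [pvDbl, pvSmall, h2]
          simp only [Bool.not_eq_true] at h2
          simp [h1, h2, hb, hd, ih]

lemma A_eq_spec (route : List String) : double_small_cave2 route = pvSpec route 0 := by
  unfold double_small_cave2 pvSpec
  rw [aFold_eq_counter]
  dsimp only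
  rw [PySem.Dict.items_counter, caveLoop_eq]
  simp [List.any_map, List.countP_map, Function.comp_def]

lemma any_congr_mem {α : Type} (l : List α) (p q : α → Bool) (h : ∀ x ∈ l, p x = q x) :
    l.any p = l.any q := by
  induction l with
  | nil => rfl
  | cons a l ih =>
      simp only [List.any_cons, h a (by simp)]
      rw [ih (fun x hx => h x (by simp [hx]))]

-- run-scan invariant: on a sorted list every run is exactly the occurrences of its element
lemma bRuns_eq (n : Nat) : ∀ (l : List String), l.length ≤ n → l.Pairwise (· ≤ ·) →
    ∀ d : Int, bRuns l d = pvSpec l d := by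
  induction n with
  | zero =>
      intro l hl _ d
      have hnil : l = [] := List.length_eq_zero_iff.mp (Nat.le_zero.mp hl)
      subst hnil
      simp [bRuns, pvSpec, PySem.Set.ofList]
  | succ n ih =>
      intro l hl hp d
      match l with
      | [] => simp [bRuns, pvSpec, PySem.Set.ofList]
      | k :: rest =>
        have hp1 : ∀ x ∈ rest, k ≤ x := (List.pairwise_cons.mp hp).1
        have hprest : rest.Pairwise (· ≤ ·) := (List.pairwise_cons.mp hp).2
        set run := rest.takeWhile (fun x => x == k) with hrundef
        set rest' := rest.dropWhile (fun x => x == k) with hrestdef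
        have hsplit : run ++ rest' = rest := List.takeWhile_append_dropWhile
        have hrun : ∀ x ∈ run, x = k := by
          intro x hx
          have h := List.mem_takeWhile_imp (l := rest) (x := x) hx
          exact eq_of_beq h
        have hgt : ∀ x ∈ rest', k < x := by
          cases hrest' : rest' with
          | nil => simp
          | cons h t =>
              have hh : ¬ (h == k) = true := by
                have hdw : rest.dropWhile (fun x => x == k) = h :: t := by
                  rw [← hrestdef, hrest']
                have h0 := List.head?_dropWhile_not (fun x => x == k) rest
                rw [hdw] at h0
                simp only [List.head?_cons] at h0
                simp [h0]
              have hhmem : h ∈ rest := by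
                rw [← hsplit, hrest']; simp
              have hkh : k < h :=
                lt_of_le_of_ne (hp1 h hhmem) (fun he => hh (beq_iff_eq.mpr he.symm))
              intro x hx
              rcases List.mem_cons.mp hx with rfl | hxt
              · exact hkh
              · have hsub : rest'.Sublist rest := List.dropWhile_sublist _
                have hpr' : rest'.Pairwise (· ≤ ·) := hprest.sublist hsub
                have : h ≤ x := by
                  rw [hrest'] at hpr'
                  exact (List.pairwise_cons.mp hpr').1 x hxt
                exact lt_of_lt_of_le hkh this
        have hknot : k ∉ rest' := fun h => lt_irrefl k (hgt k h)
        have hcountrest' : rest'.count k = 0 := List.count_eq_zero.mpr hknot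
        have hcountk : (k :: rest).count k = run.length + 1 := by
          have hcr : run.count k = run.length :=
            List.count_eq_length.mpr (fun b hb => (hrun b hb).symm)
          rw [List.count_cons_self, ← hsplit, List.count_append, hcr, hcountrest']
        have hcountx : ∀ x, x ≠ k → (k :: rest).count x = rest'.count x := by
          intro x hx
          rw [List.count_cons_of_ne (Ne.symm hx), ← hsplit, List.count_append]
          have : run.count x = 0 := List.count_eq_zero.mpr (fun hm => hx (hrun x hm))
          omega
        have hmemI : ∀ x, x ∈ k :: rest ↔ x = k ∨ x ∈ rest' := by
          intro x
          constructor
          · intro hx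
            rcases List.mem_cons.mp hx with rfl | hx
            · exact Or.inl rfl
            · rw [← hsplit] at hx
              rcases List.mem_append.mp hx with hx | hx
              · exact Or.inl (hrun x hx)
              · exact Or.inr hx
          · rintro (rfl | hx)
            · exact List.mem_cons_self
            · rw [← hsplit]
              exact List.mem_cons_of_mem _ (List.mem_append_right _ hx)
        have hperm : (PySem.Set.ofList (k :: rest)).Perm (k :: PySem.Set.ofList rest') := by
          have hnd2 : (k :: PySem.Set.ofList rest').Nodup :=
            List.nodup_cons.mpr ⟨fun h => hknot ((PySem.Set.mem_ofList _ _).mp h),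
              PySem.Set.nodup_ofList _⟩
          refine (List.perm_ext_iff_of_nodup (PySem.Set.nodup_ofList _) hnd2).mpr ?_
          intro a
          simp only [PySem.Set.mem_ofList, List.mem_cons, hmemI]
        have hlen : rest'.length ≤ n := by
          have h1 : rest'.length ≤ rest.length := List.length_dropWhile_le _ _
          simp only [List.length_cons] at hl
          omega
        have hIH := ih rest' hlen (hprest.sublist (List.dropWhile_sublist _))
        -- the spec of (k :: rest): the head run's verdict plus the spec of the remainder
        have hspec : ∀ e : Int, pvSpec (k :: rest) e =
            (pvBad k (((k :: rest).count k : Int))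
              || pvSpec rest' (e + if pvDbl k (((k :: rest).count k : Int)) then 1 else 0)) := by
          intro e
          unfold pvSpec
          have hany : ((PySem.Set.ofList (k :: rest)).any fun r => pvBad r (((k :: rest).count r : Int)))
              = (pvBad k (((k :: rest).count k : Int))
                  || ((PySem.Set.ofList rest').any fun r => pvBad r ((rest'.count r : Int)))) := by
            rw [hperm.any_eq]
            simp only [List.any_cons]
            congr 1
            apply any_congr_mem
            intro x hx
            have hxk : x ≠ k := fun h => hknot (h ▸ (PySem.Set.mem_ofList _ _).mp hx)
            rw [hcountx x hxk]
          have hcnt : ((PySem.Set.ofList (k :: rest)).countP fun r => pvDbl r (((k :: rest).count r : Int)))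
              = ((if pvDbl k (((k :: rest).count k : Int)) then 1 else 0)
                  + ((PySem.Set.ofList rest').countP fun r => pvDbl r ((rest'.count r : Int)))) := by
            rw [hperm.countP_eq]
            simp only [List.countP_cons]
            have hco : ((PySem.Set.ofList rest').countP fun r => pvDbl r (((k :: rest).count r : Int)))
                = ((PySem.Set.ofList rest').countP fun r => pvDbl r ((rest'.count r : Int))) := by
              apply List.countP_congr
              intro x hx
              have hxk : x ≠ k := fun h => hknot (h ▸ (PySem.Set.mem_ofList _ _).mp hx)
              rw [hcountx x hxk]
            rw [hco]
            split_ifs <;> omega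
          rw [hany, hcnt]
          cases hb : pvBad k (((k :: rest).count k : Int)) with
          | true => simp
          | false =>
              simp only [Bool.false_or]
              congr 1
              refine decide_eq_decide.mpr ?_
              push_cast
              split_ifs <;> omega
        -- unfold one step of bRuns; state everything in terms of the head run's length
        have hck : (((k :: rest).count k : Int)) = ((run.length : Int) + 1) := by
          rw [hcountk]; push_cast; ring
        rw [bRuns]
        simp only [← hrundef, ← hrestdef]
        rw [hspec d, hck]
        by_cases hSE : pySE k = true
        · have hsm : pvSmall k = false := by simp [pvSmall, hSE]
          have hdb : pvDbl k ((run.length : Int) + 1) = false := by simp [pvDbl, hsm]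
          by_cases hc : ((run.length : Int) + 1) > 1
          · have hb : pvBad k ((run.length : Int) + 1) = true := by
              simp [pvBad, hSE, hc]
            simp [hSE, hc, hb]
          · have hb : pvBad k ((run.length : Int) + 1) = false := by
              simp only [pvBad, hSE, hsm, Bool.true_and, Bool.false_and, Bool.or_false]
              simpa using hc
            simp [hSE, hc, hb, hdb, hIH d]
        · by_cases hlow : pyStrIslower k = true
          · have hsm : pvSmall k = true := by simp [pvSmall, hSE, hlow]
            have hSE' : pySE k = false := by simpa using hSE
            by_cases hc2 : ((run.length : Int) + 1) > 2
            · have hb : pvBad k ((run.length : Int) + 1) = true := by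
                simp [pvBad, hsm, hc2]
              simp [hSE', hlow, hc2, hb]
            · have hb : pvBad k ((run.length : Int) + 1) = false := by
                simp only [pvBad, hsm, hSE', Bool.true_and, Bool.false_and, Bool.false_or]
                simpa using hc2
              by_cases heq2 : (((run.length : Int) + 1) == 2) = true
              · have hdb : pvDbl k ((run.length : Int) + 1) = true := by
                  simp only [pvDbl, hsm, Bool.true_and]; exact heq2
                simp [hSE', hlow, hc2, heq2, hb, hdb, hIH (d + 1)]
              · have hdb : pvDbl k ((run.length : Int) + 1) = false := by
                  simp only [pvDbl, hsm, Bool.true_and]; simpa using heq2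
                simp [hSE', hlow, hc2, heq2, hb, hdb, hIH d]
          · have hsm : pvSmall k = false := by simp [pvSmall, hlow]
            have hSE' : pySE k = false := by simpa using hSE
            have hlow' : pyStrIslower k = false := by simpa using hlow
            have hb : pvBad k ((run.length : Int) + 1) = false := by
              simp [pvBad, hsm, hSE']
            have hdb : pvDbl k ((run.length : Int) + 1) = false := by simp [pvDbl, hsm]
            simp [hSE', hlow', hb, hdb, hIH d]

lemma B_eq_spec (route : List String) : double_small_cave2_alt route = pvSpec route 0 := by
  unfold double_small_cave2_alt
  have hperm : (PySem.List.sorted route (fun x => x) false).Perm route :=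
    PySem.List.sorted_perm route (fun x => x) false
  have hpw : (PySem.List.sorted route (fun x => x) false).Pairwise (· ≤ ·) := by
    simpa using PySem.List.sorted_pairwise route (fun x => x)
  rw [bRuns_eq (PySem.List.sorted route (fun x => x) false).length _ le_rfl hpw 0]
  -- transfer the count-based spec along the permutation
  unfold pvSpec
  have hsets : (PySem.Set.ofList (PySem.List.sorted route (fun x => x) false)).Perm
      (PySem.Set.ofList route) := by
    rw [List.perm_ext_iff_of_nodup (PySem.Set.nodup_ofList _) (PySem.Set.nodup_ofList _)]
    intro a
    simp [PySem.Set.mem_ofList, hperm.mem_iff]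
  have hc : ∀ r, (PySem.List.sorted route (fun x => x) false).count r = route.count r :=
    fun r => hperm.count_eq r
  rw [hsets.any_eq, hsets.countP_eq]
  congr 1
  · apply any_congr_mem; intro x _; rw [hc]
  · refine decide_eq_decide.mpr ?_
    have hcp : ((PySem.Set.ofList route).countP fun r =>
          pvDbl r (((PySem.List.sorted route (fun x => x) false).count r : Int)))
        = ((PySem.Set.ofList route).countP fun r => pvDbl r ((route.count r : Int))) :=
      List.countP_congr (fun x _ => by rw [hc])
    rw [hcp]

-- ===== VERDICT (by name: the statement is the Claim_ definition above) =====
theorem double_small_cave2_spec : Claim_equal_double_small_cave2 := by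
  intro route _
  unfold Spec_double_small_cave2
  rw [A_eq_spec, B_eq_spec]
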